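-- pv_equiv track=rewrite | github.com/ladybuginthemug/algorithmical-patterns | lindenmeyer-systems.py | create_lsystem
-- ===== SOURCE A (Python) =====
-- def create_lsystem(num_generations, axiom, rules):
--     instructions = axiom
--     for i in range(num_generations):
--         new_instructions = []
--         for cmd in instructions:
--             if cmd in rules:
--                 new_instructions.extend(rules[cmd])
--             else:
--                 new_instructions.append(cmd)
--         instructions = new_instructions
--     return instructions
-- ===== SOURCE B (Python) =====
-- def create_lsystem(num_generations, axiom, rules):
--     # Depth-first recursive expansion per symbol instead of generation-by-generation rebuilding.
--     def expand(sym, gen):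
--         if gen <= 0 or sym not in rules:
--             return [sym]
--         out = []
--         for c in rules[sym]:
--             out.extend(expand(c, gen - 1))
--         return out
--     result = []
--     for c in axiom:
--         result.extend(expand(c, num_generations))
--     return result
-- ===== Notes on version B (the rewrite author's own statement) =====
-- stated objective: alternative
-- what changed: B expands each symbol by depth-first recursion to full depth (expand(sym, gen) concatenated over the axiom) instead of A's breadth-first generation-by-generation rebuilding of the whole instruction list.
-- outside the precondition, e.g. on create_lsystem(0, 'A', {}): A returns 'A', B returns ['A']
import Mathlib
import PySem

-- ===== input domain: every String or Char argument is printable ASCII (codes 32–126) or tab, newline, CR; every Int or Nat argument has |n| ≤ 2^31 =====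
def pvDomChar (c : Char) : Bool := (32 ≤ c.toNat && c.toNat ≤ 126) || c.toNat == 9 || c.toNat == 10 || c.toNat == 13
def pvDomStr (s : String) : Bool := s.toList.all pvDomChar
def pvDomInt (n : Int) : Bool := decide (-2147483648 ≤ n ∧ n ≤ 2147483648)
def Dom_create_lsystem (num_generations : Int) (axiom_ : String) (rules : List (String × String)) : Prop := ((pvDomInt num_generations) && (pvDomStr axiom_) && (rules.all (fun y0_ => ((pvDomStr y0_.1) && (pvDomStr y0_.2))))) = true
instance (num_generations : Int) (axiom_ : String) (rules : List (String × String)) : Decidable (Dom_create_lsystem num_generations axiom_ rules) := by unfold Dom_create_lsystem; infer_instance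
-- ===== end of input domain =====

-- B expands each symbol by depth-first recursion to full depth instead of A's
-- breadth-first generation-by-generation rebuilding of the whole list (objective: alternative).

-- dict lookup (first match in the association list), shared input decoding
def rulesGet? (rules : List (String × String)) (k : String) : Option String :=
  (rules.find? (fun p => p.1 == k)).map (·.2)

-- a Python string viewed as the list of its one-character strings (iteration over a str)
def strChars (s : String) : List String :=
  s.toList.map (fun c => String.mk [c])

-- ===== PORT A =====
-- one generation: the inner 'for cmd in instructions' loop with extend/append
def lsysStep (rules : List (String × String)) (instructions : List String) : List String :=
  instructions.foldl (fun acc cmd =>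
    match rulesGet? rules cmd with
    | some v => acc ++ strChars v     -- new_instructions.extend(rules[cmd])
    | none => acc ++ [cmd]) []        -- new_instructions.append(cmd)

def create_lsystem (num_generations : Int) (axiom_ : String) (rules : List (String × String)) : List String :=
  (PySem.List.pyRange 0 num_generations 1).foldl
    (fun instructions _ => lsysStep rules instructions) (strChars axiom_)

-- ===== PORT B =====
def lsysExpand (rules : List (String × String)) (gen : Nat) (sym : String) : List String :=
  match gen with
  | 0 => [sym]
  | g + 1 =>
    match rulesGet? rules sym with
    | some v => (strChars v).flatMap (lsysExpand rules g)
    | none => [sym]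

def create_lsystem_alt (num_generations : Int) (axiom_ : String) (rules : List (String × String)) : List String :=
  (strChars axiom_).flatMap (lsysExpand rules num_generations.toNat)

-- ===== PRECONDITION & SPEC =====
-- Pre_ excludes num_generations < 1: there A returns the axiom STRING unchanged, which is a
-- str, not a value of the declared list-of-strings return type; B returns the list of its characters.
def Pre_create_lsystem (num_generations : Int) (axiom_ : String) (rules : List (String × String)) : Prop :=
  1 ≤ num_generations
instance (num_generations : Int) (axiom_ : String) (rules : List (String × String)) : Decidable (Pre_create_lsystem num_generations axiom_ rules) := by unfold Pre_create_lsystem; infer_instance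

def pvWitness_create_lsystem : Int × String × (List (String × String)) :=
  (2, "AB", [("A", "AB"), ("B", "A")])

def Spec_create_lsystem (num_generations : Int) (axiom_ : String) (rules : List (String × String)) (out : List String) : Prop := out = create_lsystem_alt num_generations axiom_ rules
instance (num_generations : Int) (axiom_ : String) (rules : List (String × String)) (out : List String) : Decidable (Spec_create_lsystem num_generations axiom_ rules out) := by unfold Spec_create_lsystem; infer_instance

-- ===== CLAIM (what is proved, stated in full; the proofs are below) =====
def Claim_equal_create_lsystem : Prop := ∀ (num_generations : Int) (axiom_ : String) (rules : List (String × String)), Dom_create_lsystem num_generations axiom_ rules → Pre_create_lsystem num_generations axiom_ rules → Spec_create_lsystem num_generations axiom_ rules (create_lsystem num_generations axiom_ rules)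

-- ===== LEMMAS AND PROOFS =====

-- an unlooked-up symbol expands to itself at every depth
theorem lsysExpand_none {rules : List (String × String)} {sym : String}
    (h : rulesGet? rules sym = none) (g : Nat) : lsysExpand rules g sym = [sym] := by
  cases g with
  | zero => rfl
  | succ g => simp [lsysExpand, h]

-- one breadth-first generation pushed through flatMap = one more depth of recursion
theorem step_flatMap (rules : List (String × String)) (g : Nat) (L : List String) :
    (lsysStep rules L).flatMap (lsysExpand rules g) = L.flatMap (lsysExpand rules (g + 1)) := by
  have hstep : lsysStep rules L = L.flatMap (fun cmd =>
      match rulesGet? rules cmd with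
      | some v => strChars v
      | none => [cmd]) := by
    unfold lsysStep
    rw [show (fun (acc : List String) cmd =>
        match rulesGet? rules cmd with
        | some v => acc ++ strChars v
        | none => acc ++ [cmd]) = (fun acc cmd => acc ++
          match rulesGet? rules cmd with
          | some v => strChars v
          | none => [cmd]) from by
      funext acc cmd; cases rulesGet? rules cmd <;> rfl]
    exact PySem.List.foldl_append_eq_flatMap _ L []
  rw [hstep, List.flatMap_assoc]
  apply List.flatMap_congr  -- pointwise
  intro cmd _
  cases hc : rulesGet? rules cmd with
  | some v => simp [lsysExpand, hc]
  | none => simp [lsysExpand_none hc, lsysExpand, hc]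

-- n breadth-first generations = depth-n recursive expansion
theorem iterate_eq_flatMap (rules : List (String × String)) (n : Nat) (L : List String) :
    (lsysStep rules)^[n] L = L.flatMap (lsysExpand rules n) := by
  induction n generalizing L with
  | zero => simp [lsysExpand]
  | succ n ih =>
    rw [Function.iterate_succ_apply, ih, step_flatMap]

-- a foldl that ignores the list elements only depends on the length
theorem foldl_const_length {α β : Type} (f : β → β) (l : List α) (x : β) :
    l.foldl (fun s _ => f s) x = f^[l.length] x := by
  induction l generalizing x with
  | nil => rfl
  | cons a t ih => simp [List.foldl_cons, ih, Function.iterate_succ_apply]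

theorem create_lsystem_spec : Claim_equal_create_lsystem := by
  intro n axiom_ rules _ _
  unfold Spec_create_lsystem create_lsystem create_lsystem_alt
  rw [foldl_const_length (lsysStep rules), PySem.List.length_pyRange_one,
    iterate_eq_flatMap]
  norm_num
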